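-- pv_equiv track=rewrite | github.com/pypi-data/pypi-mirror-250 | packages/lamini/lamini-2.0.5-72-py3-none-any.whl/lamini/api/inference_queue.py | batch_items
-- ===== SOURCE A (Python) =====
-- def batch_items(items, threads, batch_size):
--     batches = [[] for _ in range(threads)]
--     import math
--
--     i_len = len(items)
--     num_buckets_needed = math.ceil(i_len / batch_size)
--     if num_buckets_needed > threads:
--         batches = [[] for _ in range(num_buckets_needed)]
--         i = 0
--         while items:
--             batches[i] = items[:batch_size]
--             i += 1
--             items = items[batch_size:]
--
--     else:
--         i = 0
--         num_per_bucket = math.floor(len(items) / threads)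
--         remainder = len(items) % threads
--         for buck_index in range(len(batches)):
--             for _ in range(num_per_bucket):
--                 batches[buck_index].append(items[i])
--                 i += 1
--             if remainder:
--                 batches[buck_index].append(items[i])
--                 remainder -= 1
--                 i += 1
--     return [b for b in batches if b]
-- ===== SOURCE B (Python) =====
-- def batch_items(items, threads, batch_size):
--     import math
--     n = len(items)
--     num_buckets_needed = math.ceil(n / batch_size)
--     if num_buckets_needed > threads:
--         sizes = [batch_size] * num_buckets_needed
--     else:
--         base, rem = divmod(n, threads)
--         sizes = [base + 1] * rem + [base] * (threads - rem)
--     batches = []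
--     idx = 0
--     for s in sizes:
--         batches.append(items[idx:idx + s])
--         idx += s
--     return [b for b in batches if b]
-- ===== Notes on version B (the rewrite author's own statement) =====
-- stated objective: simpler
-- what changed: Instead of A's two different filling loops (tail-reslicing with indexed assignment, and a nested per-element append loop with a remainder countdown), B computes in each branch only the list of bucket sizes and fills all buckets with one shared contiguous-slice pass over a running offset (bulk slices instead of per-element appends give a constant-factor speedup).
import Mathlib
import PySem

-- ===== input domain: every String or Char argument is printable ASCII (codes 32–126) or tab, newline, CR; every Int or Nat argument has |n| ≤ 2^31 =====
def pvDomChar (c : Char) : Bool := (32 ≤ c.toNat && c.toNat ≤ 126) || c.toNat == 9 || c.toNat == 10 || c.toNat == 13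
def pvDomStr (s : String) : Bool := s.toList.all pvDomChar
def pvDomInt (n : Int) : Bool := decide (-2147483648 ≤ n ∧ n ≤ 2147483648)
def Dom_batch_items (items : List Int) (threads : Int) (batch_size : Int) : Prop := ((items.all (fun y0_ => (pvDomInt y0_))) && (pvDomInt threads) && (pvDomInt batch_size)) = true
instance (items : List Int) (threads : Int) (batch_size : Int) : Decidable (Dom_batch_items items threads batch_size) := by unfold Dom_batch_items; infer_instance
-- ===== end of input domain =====

-- B restructures A's two filling loops into one shared size-driven contiguous-slice pass (simpler; bulk slices measured constant-factor faster).

-- ===== PORT A =====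
-- 'while items: batches[i] = items[:batch_size]; i += 1; items = items[batch_size:]'.
-- fuel = items.length + 1 exceeds the iteration count whenever batch_size > 0 (inside Pre_);
-- on inputs outside Pre_ where Python would loop forever or raise IndexError the port just stops
-- (pySetD is the total form of the assignment, exact while the index is in range, which Pre_ guarantees).
def batchWhile (fuel : Nat) (its : List Int) (batch_size : Int)
    (batches : List (List Int)) (i : Int) : List (List Int) :=
  match fuel with
  | 0 => batches
  | fuel + 1 =>
    if its = [] then batches
    else
      batchWhile fuel (PySem.List.slice its (some batch_size) none) batch_size
        (PySem.List.pySetD batches i (PySem.List.slice its none (some batch_size))) (i + 1)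

-- 'batches[buck_index].append(items[i]); i += 1'  (pyGetD/pySetD exact while buck_index and i
-- are in range, which Pre_ guarantees on the path that runs this).
def pvAppendAt (items : List Int) (buck_index : Int) (p : List (List Int) × Int) :
    List (List Int) × Int :=
  (PySem.List.pySetD p.1 buck_index
      (PySem.List.pyGetD p.1 buck_index [] ++ [PySem.List.pyGetD items p.2 0]),
    p.2 + 1)

-- the body of 'for buck_index in range(len(batches))': state (batches, i, remainder)
def pvBucketStep (items : List Int) (num_per_bucket : Int)
    (st : List (List Int) × Int × Int) (buck_index : Int) : List (List Int) × Int × Int :=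
  let inner := (PySem.List.pyRange 0 num_per_bucket 1).foldl
      (fun p _ => pvAppendAt items buck_index p) (st.1, st.2.1)
  if st.2.2 ≠ 0 then
    let q := pvAppendAt items buck_index inner
    (q.1, q.2, st.2.2 - 1)
  else (inner.1, inner.2, st.2.2)

-- math.ceil(i_len / batch_size) on ints = -((-i_len) // batch_size), and math.floor on a
-- nonnegative int quotient = '//'; exact here since the float quotient of |numerator| ≤ len(items)
-- by 0 < |divisor| ≤ 2^31 never rounds across an integer.
def batch_items (items : List Int) (threads : Int) (batch_size : Int) : List (List Int) :=
  let batches : List (List Int) := (PySem.List.pyRange 0 threads 1).map (fun _ => [])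
  let i_len : Int := (items.length : Int)
  let num_buckets_needed : Int := -(PySem.Int.floordiv (-i_len) batch_size)
  let batches :=
    if num_buckets_needed > threads then
      batchWhile (items.length + 1) items batch_size
        ((PySem.List.pyRange 0 num_buckets_needed 1).map (fun _ => [])) 0
    else
      let num_per_bucket : Int := PySem.Int.floordiv i_len threads
      let st :=
        (PySem.List.pyRange 0 (batches.length : Int) 1).foldl
          (pvBucketStep items num_per_bucket)
          (batches, (0 : Int), PySem.Int.mod i_len threads)
      st.1
  batches.filter (fun b => !b.isEmpty)

-- ===== PORT B =====
-- 'batches.append(items[idx:idx + s]); idx += s'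
def pvSliceStep (items : List Int) (p : List (List Int) × Int) (s : Int) :
    List (List Int) × Int :=
  (p.1 ++ [PySem.List.slice items (some p.2) (some (p.2 + s))], p.2 + s)

def batch_items_alt (items : List Int) (threads : Int) (batch_size : Int) : List (List Int) :=
  let n : Int := (items.length : Int)
  let num_buckets_needed : Int := -(PySem.Int.floordiv (-n) batch_size)
  let sizes : List Int :=
    if num_buckets_needed > threads then
      PySem.List.pyRepeat [batch_size] num_buckets_needed
    else
      let base : Int := PySem.Int.floordiv n threads
      let rem : Int := PySem.Int.mod n threads
      PySem.List.pyRepeat [base + 1] rem ++ PySem.List.pyRepeat [base] (threads - rem)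
  let st := sizes.foldl (pvSliceStep items) ([], 0)
  st.1.filter (fun b => !b.isEmpty)

-- ===== PRECONDITION & SPEC =====
-- Pre_ excludes exactly the inputs on which A raises (or loops): batch_size = 0 (ZeroDivisionError
-- in ceil); the else branch reached with threads = 0 (ZeroDivisionError in floor); and the then
-- branch reached with batch_size < 0 and nonempty items (IndexError: ceil ≤ 0 buckets allocated).
def Pre_batch_items (items : List Int) (threads : Int) (batch_size : Int) : Prop :=
  batch_size ≠ 0 ∧
    (let ncb := -(PySem.Int.floordiv (-(items.length : Int)) batch_size)
     (threads < ncb ∧ (0 < batch_size ∨ items = [])) ∨ (ncb ≤ threads ∧ threads ≠ 0))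
instance (items : List Int) (threads : Int) (batch_size : Int) : Decidable (Pre_batch_items items threads batch_size) := by unfold Pre_batch_items; infer_instance
def pvWitness_batch_items : List Int × Int × Int := ([1, 2, 3, 4, 5], 2, 2)

def Spec_batch_items (items : List Int) (threads : Int) (batch_size : Int) (out : List (List Int)) : Prop := out = batch_items_alt items threads batch_size
instance (items : List Int) (threads : Int) (batch_size : Int) (out : List (List Int)) : Decidable (Spec_batch_items items threads batch_size out) := by unfold Spec_batch_items; infer_instance

-- ===== CLAIM (what is proved, stated in full; the proofs are below) =====
def Claim_equal_batch_items : Prop := ∀ (items : List Int) (threads : Int) (batch_size : Int), Dom_batch_items items threads batch_size → Pre_batch_items items threads batch_size → Spec_batch_items items threads batch_size (batch_items items threads batch_size)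

-- ===== LEMMAS AND PROOFS =====

-- Reference decomposition both ports are reduced to: contiguous chunks of items.
-- For bs > 0, xs.drop (bs - 1) = (x :: xs).drop bs, so pvChunks bs l = the size-bs chunks of l.
def pvChunks (bs : Nat) : List Int → List (List Int)
  | [] => []
  | x :: xs => ((x :: xs).take bs) :: pvChunks bs (xs.drop (bs - 1))
  termination_by l => l.length
  decreasing_by simp

-- pvAssemble items ss idx = the slices items[idx:idx+s] for the sizes s in ss, offsets accumulating.
def pvAssemble (items : List Int) : List Int → Int → List (List Int)
  | [], _ => []
  | s :: ss, idx => PySem.List.slice items (some idx) (some (idx + s)) :: pvAssemble items ss (idx + s)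

-- B's fold is pvAssemble.
theorem pvFoldB (items : List Int) (sizes : List Int) (acc : List (List Int)) (idx : Int) :
    (sizes.foldl (pvSliceStep items) (acc, idx)).1 = acc ++ pvAssemble items sizes idx := by
  induction sizes generalizing acc idx with
  | nil => simp [pvAssemble]
  | cons s ss ih => simp [pvAssemble, pvSliceStep, ih]

theorem pvChunks_count (bs : Nat) (hbs : 0 < bs) :
    ∀ l : List Int, (pvChunks bs l).length = (l.length + bs - 1) / bs := by
  intro l
  induction l using pvChunks.induct bs with
  | case1 =>
    simp only [pvChunks, List.length_nil]
    exact (Nat.div_eq_of_lt (by omega)).symm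
  | case2 x xs ih =>
    rw [pvChunks]
    simp only [List.length_cons, ih, List.length_drop]
    have hgoal : xs.length + 1 + bs - 1 = xs.length + bs := by omega
    rw [hgoal, Nat.add_div_right _ hbs]
    rcases Nat.lt_or_ge xs.length (bs - 1) with h | h
    · rw [Nat.div_eq_of_lt (by omega), Nat.div_eq_of_lt (by omega)]
    · have : xs.length - (bs - 1) + bs - 1 = xs.length := by omega
      rw [this]

-- ceil(n / bs) as A computes it, for bs > 0.
theorem pvCeilPos (n bs : Nat) (hbs : 0 < bs) :
    -(PySem.Int.floordiv (-(n : Int)) (bs : Int)) = (((n + bs - 1) / bs : Nat) : Int) := by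
  rw [PySem.Int.neg_floordiv_neg_eq_iff_of_pos (by exact_mod_cast hbs)]
  have h := Nat.div_add_mod (n + bs - 1) bs
  have h2 := Nat.mod_lt (n + bs - 1) hbs
  set q := (n + bs - 1) / bs with hq
  set r := (n + bs - 1) % bs with hr
  have e : bs * q + r + 1 = n + bs := by omega
  have e' : (bs : Int) * (q : Int) + (r : Int) + 1 = (n : Int) + (bs : Int) := by exact_mod_cast e
  have h2' : (r : Int) < (bs : Int) := by exact_mod_cast h2
  have hr0 : (0 : Int) ≤ (r : Int) := Int.natCast_nonneg r
  constructor
  · nlinarith [e', h2', hr0]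
  · nlinarith [e', h2', hr0]

-- A's while loop writes the chunks of its into consecutive empty buckets.
theorem pvWhileA (bs : Nat) (hbs : 0 < bs) :
    ∀ (fuel : Nat) (its : List Int), its.length < fuel → ∀ (done : List (List Int)),
      batchWhile fuel its (bs : Int)
          (done ++ List.replicate (pvChunks bs its).length []) (done.length : Int)
        = done ++ pvChunks bs its := by
  intro fuel
  induction fuel with
  | zero => intro its h; omega
  | succ fuel ih =>
    intro its h done
    match its with
    | [] => simp [batchWhile, pvChunks]
    | x :: xs =>
      rw [pvChunks]
      rw [batchWhile, if_neg (by simp)]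
      rw [PySem.List.slice_to_natCast, PySem.List.slice_from_natCast]
      simp only [List.length_cons, List.replicate_succ]
      rw [PySem.List.pySetD_natCast]
      have hset : (done ++ [] :: List.replicate (pvChunks bs (xs.drop (bs - 1))).length []).set
          done.length ((x :: xs).take bs)
          = (done ++ [(x :: xs).take bs]) ++ List.replicate (pvChunks bs (xs.drop (bs - 1))).length [] := by
        simp
      have hdrop : (x :: xs).drop bs = xs.drop (bs - 1) := by
        have : bs = (bs - 1) + 1 := by omega
        rw [this]; simp
      rw [hset, hdrop]
      have hlen : (done.length : Int) + 1 = ((done ++ [(x :: xs).take bs]).length : Int) := by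
        simp
      have hlt : (xs.drop (bs - 1)).length < fuel := by
        have h' : xs.length + 1 < fuel + 1 := by simpa using h
        simp only [List.length_drop]
        omega
      rw [hlen, ih (xs.drop (bs - 1)) hlt (done ++ [(x :: xs).take bs])]
      simp

-- pvAssemble over constant sizes bs produces the chunks.
theorem pvAssembleChunks (items : List Int) (bs : Nat) (hbs : 0 < bs) :
    ∀ (fuel : Nat) (rest : List Int) (idx : Nat), rest.length < fuel → rest = items.drop idx →
      pvAssemble items (List.replicate (pvChunks bs rest).length (bs : Int)) (idx : Int)
        = pvChunks bs rest := by
  intro fuel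
  induction fuel with
  | zero => intro rest idx h; omega
  | succ fuel ih =>
    intro rest idx h hrest
    match hr : rest with
    | [] => simp [pvChunks, pvAssemble]
    | x :: xs =>
      rw [pvChunks]
      simp only [List.length_cons, List.replicate_succ]
      rw [pvAssemble]
      rw [PySem.List.slice_natCast_add]
      have h1 : (idx : Int) + (bs : Int) = ((idx + bs : Nat) : Int) := by push_cast; ring
      have h2 : xs.drop (bs - 1) = items.drop (idx + bs) := by
        have : (x :: xs).drop bs = xs.drop (bs - 1) := by
          have : bs = (bs - 1) + 1 := by omega
          rw [this]; simp
        rw [← this, hrest, List.drop_drop]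
      have hlt : (xs.drop (bs - 1)).length < fuel := by
        have h' : xs.length + 1 < fuel + 1 := by simpa using h
        simp only [List.length_drop]
        omega
      rw [h1, ih (xs.drop (bs - 1)) (idx + bs) hlt h2]
      rw [hrest]

-- the inner 'for _ in range(num_per_bucket)' loop appends a contiguous run to one bucket.
theorem pvInner (items : List Int) (d : Nat) :
    ∀ (cnt : Nat) (done : List (List Int)), done.length = d →
      ∀ (b : List Int) (rest : List (List Int)) (i : Nat), i + cnt ≤ items.length →
      (PySem.List.pyRange 0 (cnt : Int) 1).foldl
          (fun p _ => pvAppendAt items (d : Int) p) (done ++ b :: rest, (i : Int))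
        = (done ++ (b ++ (items.drop i).take cnt) :: rest, ((i + cnt : Nat) : Int)) := by
  intro cnt
  induction cnt with
  | zero =>
    intro done hd b rest i hi
    simp [PySem.List.pyRange_one_eq_nil]
  | succ cnt ih =>
    intro done hd b rest i hi
    have hr : PySem.List.pyRange 0 ((cnt : Int) + 1) 1
        = PySem.List.pyRange 0 (cnt : Int) 1 ++ [(cnt : Int)] := by
      exact PySem.List.pyRange_one_succ_right (by positivity)
    have hcast : ((cnt + 1 : Nat) : Int) = (cnt : Int) + 1 := by push_cast; ring
    rw [hcast, hr, List.foldl_append, ih done hd b rest i (by omega)]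
    simp only [List.foldl_cons, List.foldl_nil, pvAppendAt]
    subst hd
    have hget : PySem.List.pyGetD (done ++ (b ++ (items.drop i).take cnt) :: rest)
        ((done.length : Nat) : Int) [] = b ++ (items.drop i).take cnt := by
      rw [PySem.List.pyGetD_natCast]
      simp
    rw [hget, PySem.List.pySetD_natCast]
    have hitem : PySem.List.pyGetD items ((i + cnt : Nat) : Int) 0 = items.getD (i + cnt) 0 := by
      rw [PySem.List.pyGetD_natCast]
    have htake : (items.drop i).take (cnt + 1)
        = (items.drop i).take cnt ++ [items.getD (i + cnt) 0] := by
      have hlt : i + cnt < items.length := by omega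
      rw [List.take_add_one]
      have : (items.drop i)[cnt]? = some (items.getD (i + cnt) 0) := by
        rw [List.getElem?_drop]
        rw [List.getD_eq_getElem _ _ hlt, List.getElem?_eq_getElem (by omega)]
      rw [this]
      simp
    rw [hitem]
    simp only [Prod.mk.injEq]
    refine ⟨?_, ?_⟩
    · simp [htake]
    · push_cast; ring

-- the outer bucket loop equals pvAssemble on B's size list.
theorem pvMaster (items : List Int) (npbN : Nat) :
    ∀ (m : Nat) (done : List (List Int)) (i : Nat) (rem : Int), 0 ≤ rem → rem.toNat ≤ m →
      (i : Int) + (npbN : Int) * (m : Int) + rem = (items.length : Int) →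
      ((PySem.List.pyRange (done.length : Int) ((done.length : Int) + (m : Int)) 1).foldl
          (pvBucketStep items (npbN : Int)) (done ++ List.replicate m [], (i : Int), rem)).1
        = done ++ pvAssemble items
            (List.replicate rem.toNat ((npbN : Int) + 1)
              ++ List.replicate (m - rem.toNat) (npbN : Int)) (i : Int) := by
  intro m
  induction m with
  | zero =>
    intro done i rem h0 hrm heq
    have : rem.toNat = 0 := by omega
    simp [this, PySem.List.pyRange_one_eq_nil, pvAssemble]
  | succ m ih =>
    intro done i rem h0 hrm heq
    have hnn : (0 : Int) ≤ (npbN : Int) * (m : Int) := by positivity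
    have hcnt : i + npbN ≤ items.length := by
      have : (npbN : Int) * ((m : Int) + 1) = (npbN : Int) * (m : Int) + npbN := by ring
      push_cast at heq
      rw [this] at heq
      omega
    have hrange : PySem.List.pyRange (done.length : Int) ((done.length : Int) + ((m : Nat) + 1 : Int)) 1
        = (done.length : Int) :: PySem.List.pyRange ((done.length : Int) + 1) ((done.length : Int) + ((m : Nat) + 1 : Int)) 1 :=
      PySem.List.pyRange_one_cons (by omega)
    have hcast1 : (((m : Nat) + 1 : Nat) : Int) = ((m : Nat) : Int) + 1 := by push_cast; ring
    rw [hcast1, hrange]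
    rw [List.foldl_cons]
    -- the first bucket
    have hstep : pvBucketStep items (npbN : Int)
        (done ++ List.replicate (m + 1) [], (i : Int), rem) (done.length : Int)
        = if rem ≠ 0 then
            ((done ++ [(items.drop i).take (npbN + 1)]) ++ List.replicate m [],
              ((i + npbN + 1 : Nat) : Int), rem - 1)
          else
            ((done ++ [(items.drop i).take npbN]) ++ List.replicate m [],
              ((i + npbN : Nat) : Int), rem) := by
      rw [pvBucketStep]
      dsimp only
      rw [List.replicate_succ]
      rw [pvInner items done.length npbN done rfl [] (List.replicate m []) i hcnt]
      split_ifs with hrem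
      · -- remainder: one more append to the same bucket
        simp only [pvAppendAt]
        have hget : PySem.List.pyGetD
            (done ++ ([] ++ (items.drop i).take npbN) :: List.replicate m [])
            ((done.length : Nat) : Int) [] = [] ++ (items.drop i).take npbN := by
          rw [PySem.List.pyGetD_natCast]; simp
        rw [hget, PySem.List.pySetD_natCast, PySem.List.pyGetD_natCast]
        have hlt : i + npbN < items.length := by
          have : (npbN : Int) * ((m : Int) + 1) = (npbN : Int) * (m : Int) + npbN := by ring
          push_cast at heq
          rw [this] at heq
          omega
        have htake : (items.drop i).take (npbN + 1)
            = (items.drop i).take npbN ++ [items.getD (i + npbN) 0] := by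
          rw [List.take_add_one]
          have : (items.drop i)[npbN]? = some (items.getD (i + npbN) 0) := by
            rw [List.getElem?_drop]
            rw [List.getD_eq_getElem _ _ hlt, List.getElem?_eq_getElem (by omega)]
          rw [this]; simp
        simp only [Prod.mk.injEq]
        refine ⟨?_, ?_, trivial⟩
        · simp [htake]
        · push_cast; ring
      · simp
    rw [hstep]
    split_ifs with hrem
    · -- rem ≠ 0
    
      have hrt : rem.toNat = (rem - 1).toNat + 1 := by omega
      rw [hrt]
      rw [List.replicate_succ]
      simp only [List.cons_append, pvAssemble]
      have hs1 : (i : Int) + ((npbN : Int) + 1) = (((i + npbN + 1 : Nat)) : Int) := by push_cast; ring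
      have hslice : PySem.List.slice items (some (i : Int)) (some ((i : Int) + ((npbN : Int) + 1)))
          = (items.drop i).take (npbN + 1) := by
        have : (i : Int) + ((npbN : Int) + 1) = (i : Int) + ((npbN + 1 : Nat) : Int) := by push_cast; ring
        rw [this, PySem.List.slice_natCast_add]
      have hend : (done.length : Int) + ((m : Int) + 1)
          = (((done ++ [(items.drop i).take (npbN + 1)]).length : Nat) : Int) + (m : Int) := by
        simp; ring
      have hdl : (done.length : Int) + 1 = (((done ++ [(items.drop i).take (npbN + 1)]).length : Nat) : Int) := by
        simp
      rw [hend, hdl]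
      rw [ih (done ++ [(items.drop i).take (npbN + 1)]) (i + npbN + 1) (rem - 1)
        (by omega) (by omega)
        (by push_cast at heq ⊢; nlinarith [heq])]
      have hm : m + 1 - ((rem - 1).toNat + 1) = m - (rem - 1).toNat := by omega
      rw [hm, hslice, hs1]
      simp
    · -- rem = 0
      have hr0 : rem = 0 := by omega
      subst hr0
      simp only [Int.toNat_zero, List.replicate_zero, List.nil_append, Nat.sub_zero] at *
      rw [List.replicate_succ]
      rw [pvAssemble]
      have hslice : PySem.List.slice items (some (i : Int)) (some ((i : Int) + (npbN : Int)))
          = (items.drop i).take npbN := by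
        exact PySem.List.slice_natCast_add items i npbN
      have hend : (done.length : Int) + ((m : Int) + 1)
          = (((done ++ [(items.drop i).take npbN]).length : Nat) : Int) + (m : Int) := by
        simp; ring
      have hdl : (done.length : Int) + 1 = (((done ++ [(items.drop i).take npbN]).length : Nat) : Int) := by
        simp
      rw [hend, hdl]
      rw [ih (done ++ [(items.drop i).take npbN]) (i + npbN) 0 le_rfl (by omega)
        (by push_cast at heq ⊢; nlinarith [heq])]
      have hs1 : (i : Int) + (npbN : Int) = (((i + npbN : Nat)) : Int) := by push_cast; ring
      rw [hslice, hs1]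
      simp

-- constant-map over a range is replicate.
theorem pvMapConst (a b : Int) (c : List Int) :
    (PySem.List.pyRange a b 1).map (fun _ => c) = List.replicate (b - a).toNat c := by
  refine List.eq_replicate_iff.mpr ⟨by simp [PySem.List.length_pyRange_one], ?_⟩
  intro x hx
  simp only [List.mem_map] at hx
  exact hx.choose_spec.2.symm

theorem batch_items_spec : Claim_equal_batch_items := by
  intro items threads bs _ hpre
  obtain ⟨hbs0, hpre2⟩ := hpre
  unfold Spec_batch_items
  simp only at hpre2
  by_cases hbr : threads < -(PySem.Int.floordiv (-(items.length : Int)) bs)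
  · -- branch 1: more buckets needed than threads
    by_cases hnil : items = []
    · subst hnil
      have hz : PySem.Int.floordiv (-((List.length ([] : List Int)) : Int)) bs = 0 := by
        simp [PySem.Int.floordiv]
      simp only [batch_items, batch_items_alt, hz]
      norm_num
      rw [if_pos (by simpa [hz] using hbr), if_pos (by simpa [hz] using hbr)]
      simp [batchWhile]
    · have hpos : 0 < bs := by
        rcases hpre2 with ⟨_, h | h⟩ | ⟨h, _⟩
        · exact h
        · exact absurd h hnil
        · omega
      set n := items.length with hn
      set bsN := bs.toNat with hbsN
      have hbs : bs = (bsN : Int) := by omega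
      have hq : -(PySem.Int.floordiv (-(n : Int)) bs) = (((n + bsN - 1) / bsN : Nat) : Int) := by
        rw [hbs]; exact pvCeilPos n bsN (by omega)
      have hcc : (n + bsN - 1) / bsN = (pvChunks bsN items).length :=
        (pvChunks_count bsN (by omega) items).symm
      -- A's side
      have hA : batch_items items threads bs
          = (batchWhile (n + 1) items bs
              ((PySem.List.pyRange 0 (-(PySem.Int.floordiv (-(n : Int)) bs)) 1).map (fun _ => [])) 0).filter
              (fun b => !b.isEmpty) := by
        simp only [batch_items]
        rw [if_pos hbr]
      have hmap : (PySem.List.pyRange 0 (-(PySem.Int.floordiv (-(n : Int)) bs)) 1).map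
          (fun _ => ([] : List Int))
          = List.replicate (pvChunks bsN items).length [] := by
        rw [pvMapConst, hq]
        simp only [Int.sub_zero, Int.toNat_natCast]
        rw [hcc]
      have hW := pvWhileA bsN (by omega) (n + 1) items (by omega) []
      simp only [List.nil_append, List.length_nil, Nat.cast_zero] at hW
      rw [← hbs] at hW
      rw [hA, hmap, hW]
      -- B's side
      have hB : batch_items_alt items threads bs
          = ((PySem.List.pyRepeat [bs] (-(PySem.Int.floordiv (-(n : Int)) bs))).foldl
              (pvSliceStep items) ([], 0)).1.filter (fun b => !b.isEmpty) := by
        simp only [batch_items_alt]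
        rw [if_pos hbr]
      have hAsm := pvAssembleChunks items bsN (by omega) (n + 1) items 0 (by omega) (by simp)
      simp only [Nat.cast_zero] at hAsm
      rw [← hbs] at hAsm
      rw [hB, PySem.List.pyRepeat_singleton, hq]
      simp only [Int.toNat_natCast]
      rw [hcc, pvFoldB, hAsm]
      simp
  · -- else branch: distribute across threads buckets
    have ht0 : threads ≠ 0 := by
      rcases hpre2 with ⟨h, _⟩ | ⟨_, h⟩
      · exact absurd h hbr
      · exact h
    have hA : batch_items items threads bs
        = (((PySem.List.pyRange 0
              ((((PySem.List.pyRange 0 threads 1).map (fun _ => ([] : List Int))).length : Int)) 1).foldl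
            (pvBucketStep items (PySem.Int.floordiv (items.length : Int) threads))
            ((PySem.List.pyRange 0 threads 1).map (fun _ => []), (0 : Int),
              PySem.Int.mod (items.length : Int) threads)).1).filter (fun b => !b.isEmpty) := by
      simp only [batch_items]
      rw [if_neg hbr]
    have hB : batch_items_alt items threads bs
        = (((PySem.List.pyRepeat [PySem.Int.floordiv (items.length : Int) threads + 1]
                (PySem.Int.mod (items.length : Int) threads)
              ++ PySem.List.pyRepeat [PySem.Int.floordiv (items.length : Int) threads]
                (threads - PySem.Int.mod (items.length : Int) threads)).foldl
            (pvSliceStep items) ([], 0)).1).filter (fun b => !b.isEmpty) := by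
      simp only [batch_items_alt]
      rw [if_neg hbr]
    rw [hA, hB]
    by_cases ht : 0 < threads
    · set N : Int := (items.length : Int) with hN
      set npb := PySem.Int.floordiv N threads with hnpb
      set rem := PySem.Int.mod N threads with hrem
      have hnpb0 : 0 ≤ npb := by
        rw [hnpb, PySem.Int.floordiv_eq_ediv_of_pos ht]
        exact Int.ediv_nonneg (by positivity) (le_of_lt ht)
      have hrem0 : 0 ≤ rem := PySem.Int.mod_nonneg N ht
      have hremlt : rem < threads := PySem.Int.mod_lt N ht
      have heq : npb * threads + rem = N := PySem.Int.floordiv_mul_add_mod N threads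
      set npbN := npb.toNat with hnpbN
      have hnpbc : npb = (npbN : Int) := by omega
      set T := threads.toNat with hT
      have hTc : threads = (T : Int) := by
        rw [hT]
        omega
      have hmap : (PySem.List.pyRange 0 threads 1).map (fun _ => ([] : List Int))
          = List.replicate T [] := by
        rw [pvMapConst, Int.sub_zero, hT]
      have hM := pvMaster items npbN T [] 0 rem hrem0 (by omega)
        (by push_cast; rw [← hnpbc, ← hTc]; omega)
      simp only [List.nil_append, List.length_nil, Nat.cast_zero, zero_add] at hM
      rw [hmap]
      rw [List.length_replicate]
      rw [hnpbc, hM]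
      rw [pvFoldB, PySem.List.pyRepeat_singleton, PySem.List.pyRepeat_singleton]
      have h2 : (threads - rem).toNat = T - rem.toNat := by omega
      rw [h2]
      simp
    · -- threads < 0: no buckets on either side
      have htneg : threads < 0 := by omega
      have hmap : (PySem.List.pyRange 0 threads 1).map (fun _ => ([] : List Int)) = [] := by
        rw [PySem.List.pyRange_one_eq_nil (by omega)]
        simp
      have hbnd := PySem.Int.mod_neg_bounds (items.length : Int) htneg
      rw [hmap]
      simp only [List.length_nil, Nat.cast_zero]
      rw [PySem.List.pyRange_one_eq_nil le_rfl]
      rw [PySem.List.pyRepeat_singleton, PySem.List.pyRepeat_singleton]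
      have h1 : (PySem.Int.mod (items.length : Int) threads).toNat = 0 := by omega
      have h2 : (threads - PySem.Int.mod (items.length : Int) threads).toNat = 0 := by omega
      rw [h1, h2]
      simp
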